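-- pv_equiv track=rewrite | github.com/amayomode/advent-of-code | 2021/day 8/decode.py | unique_shared_values
-- ===== SOURCE A (Python) =====
-- def unique_shared_values(signal_patterns):
--     unique = {1: "", 4: "", 7: "", 8: ""}
--     shared = {6: [], 5: []}
--     for pattern in signal_patterns.strip().split():
--         if len(pattern) == 2:
--             unique[1] = pattern
--         elif len(pattern) == 3:
--             unique[7] = pattern
--         elif len(pattern) == 4:
--             unique[4] = pattern
--         elif len(pattern) == 7:
--             unique[8] = pattern
--         elif len(pattern) == 6:
--             shared[6].append(pattern)
--         else:
--             shared[5].append(pattern)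
--     return unique, shared
-- ===== SOURCE B (Python) =====
-- def unique_shared_values(signal_patterns):
--     tokens = signal_patterns.strip().split()
--     buckets = {}
--     for p in tokens:
--         buckets.setdefault(len(p), []).append(p)
--     def last(n):
--         b = buckets.get(n, [])
--         return b[-1] if b else ""
--     unique = {1: last(2), 4: last(4), 7: last(3), 8: last(7)}
--     shared = {6: buckets.get(6, []),
--               5: [p for p in tokens if len(p) not in (2, 3, 4, 6, 7)]}
--     return unique, shared
-- ===== Notes on version B (the rewrite author's own statement) =====
-- stated objective: alternative
-- what changed: Instead of A's six-way branch per token that updates the result dicts in place, B groups the split tokens into length buckets in one pass and then assembles unique (last element of the 2/4/3/7 buckets, "" when empty) and shared (the length-6 bucket, plus a catch-all comprehension for lengths not in {2,3,4,6,7}).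
import Mathlib
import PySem

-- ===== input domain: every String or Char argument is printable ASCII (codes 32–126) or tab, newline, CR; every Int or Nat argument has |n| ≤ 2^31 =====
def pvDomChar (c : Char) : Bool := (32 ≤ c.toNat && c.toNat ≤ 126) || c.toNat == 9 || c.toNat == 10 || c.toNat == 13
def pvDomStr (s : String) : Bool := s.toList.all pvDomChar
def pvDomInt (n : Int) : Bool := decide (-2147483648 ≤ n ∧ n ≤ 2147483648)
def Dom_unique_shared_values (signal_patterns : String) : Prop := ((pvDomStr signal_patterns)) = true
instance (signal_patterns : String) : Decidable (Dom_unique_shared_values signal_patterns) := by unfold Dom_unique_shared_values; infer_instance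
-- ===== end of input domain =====

-- B replaces A's six-way branch-per-token loop by a single grouping pass into length
-- buckets, from which the answer is assembled (objective: alternative decomposition).

-- ===== PORT A =====
-- one iteration of A's for-loop over its (unique, shared) Python dicts

def pvAStep (st : PySem.Dict Int String × PySem.Dict Int (List String)) (p : String) :
    PySem.Dict Int String × PySem.Dict Int (List String) :=
  if PySem.Str.len p = 2 then (st.1.insert 1 p, st.2)
  else if PySem.Str.len p = 3 then (st.1.insert 7 p, st.2)
  else if PySem.Str.len p = 4 then (st.1.insert 4 p, st.2)
  else if PySem.Str.len p = 7 then (st.1.insert 8 p, st.2)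
  else if PySem.Str.len p = 6 then (st.1, st.2.modify 6 [] (· ++ [p]))
  else (st.1, st.2.modify 5 [] (· ++ [p]))


def unique_shared_values (signal_patterns : String) : (List (Int × String)) × (List (Int × List String)) :=
  let st := (PySem.Str.split₀ (PySem.Str.strip signal_patterns)).foldl pvAStep
      (PySem.Dict.ofList [(1, ""), (4, ""), (7, ""), (8, "")],
       PySem.Dict.ofList [(6, []), (5, [])])
  (st.1.items, st.2.items)

-- ===== PORT B =====
-- buckets: group the tokens by length, preserving order (setdefault(len(p), []).append(p))
def pvBuckets (toks : List String) : PySem.Dict Int (List String) :=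
  toks.foldl (fun d p => d.insert (PySem.Str.len p) (d.getD (PySem.Str.len p) [] ++ [p]))
    PySem.Dict.empty

-- last n  =  b[-1] if b else ""  for the bucket b of length n
def pvLast (d : PySem.Dict Int (List String)) (n : Int) : String :=
  match (d.getD n []).getLast? with
  | some x => x
  | none => ""

def unique_shared_values_alt (signal_patterns : String) : (List (Int × String)) × (List (Int × List String)) :=
  let toks := PySem.Str.split₀ (PySem.Str.strip signal_patterns)
  let b := pvBuckets toks
  ([(1, pvLast b 2), (4, pvLast b 4), (7, pvLast b 3), (8, pvLast b 7)],
   [(6, b.getD 6 []),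
    (5, toks.filter (fun p => !(decide (PySem.Str.len p ∈ ([2, 3, 4, 6, 7] : List Int)))))])

-- ===== PRECONDITION & SPEC =====
def Spec_unique_shared_values (signal_patterns : String) (out : (List (Int × String)) × (List (Int × List String))) : Prop := out = unique_shared_values_alt signal_patterns
instance (signal_patterns : String) (out : (List (Int × String)) × (List (Int × List String))) : Decidable (Spec_unique_shared_values signal_patterns out) := by unfold Spec_unique_shared_values; infer_instance

-- ===== CLAIM (what is proved, stated in full; the proofs are below) =====
def Claim_equal_unique_shared_values : Prop := ∀ (signal_patterns : String), Dom_unique_shared_values signal_patterns → Spec_unique_shared_values signal_patterns (unique_shared_values signal_patterns)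

-- ===== LEMMAS AND PROOFS =====

def pvOther (p : String) : Bool := !(decide (PySem.Str.len p ∈ ([2, 3, 4, 6, 7] : List Int)))

def pvLastD (toks : List String) (n : Int) (dflt : String) : String :=
  ((toks.filter (fun p => decide (PySem.Str.len p = n))).getLast?).getD dflt

lemma pvGetD_getLast?_cons (p a : String) (l : List String) :
    ((p :: l).getLast?).getD a = (l.getLast?).getD p := by
  cases l with
  | nil => rfl
  | cons h t =>
    rw [List.getLast?_cons_cons]
    cases hl : (h :: t).getLast? with
    | none => simp at hl
    | some z => simp

lemma pvLastD_cons_pos (p : String) (toks : List String) (n : Int) (dflt : String)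
    (h : PySem.Str.len p = n) : pvLastD (p :: toks) n dflt = pvLastD toks n p := by
  unfold pvLastD
  rw [List.filter_cons, if_pos (by simpa using h), pvGetD_getLast?_cons]

lemma pvLastD_cons_neg (p : String) (toks : List String) (n : Int) (dflt : String)
    (h : ¬ PySem.Str.len p = n) : pvLastD (p :: toks) n dflt = pvLastD toks n dflt := by
  unfold pvLastD
  rw [List.filter_cons, if_neg (by simpa using h)]

lemma pvAfold (toks : List String) (a b c d : String) (x y : List String) :
    toks.foldl pvAStep
      (PySem.Dict.ofList [(1, a), (4, b), (7, c), (8, d)],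
       PySem.Dict.ofList [(6, x), (5, y)]) =
    (PySem.Dict.ofList [(1, pvLastD toks 2 a), (4, pvLastD toks 4 b),
                        (7, pvLastD toks 3 c), (8, pvLastD toks 7 d)],
     PySem.Dict.ofList [(6, x ++ toks.filter (fun p => decide (PySem.Str.len p = 6))),
                        (5, y ++ toks.filter pvOther)]) := by
  induction toks generalizing a b c d x y with
  | nil => simp [pvLastD]
  | cons p toks ih =>
    rw [List.foldl_cons]
    by_cases h2 : PySem.Str.len p = 2
    · have l2 : (p.length : Int) = 2 := by simpa using h2
      rw [show pvAStep (PySem.Dict.ofList [(1, a), (4, b), (7, c), (8, d)], PySem.Dict.ofList [(6, x), (5, y)]) p = (PySem.Dict.ofList [(1, p), (4, b), (7, c), (8, d)], PySem.Dict.ofList [(6, x), (5, y)]) from by simp only [pvAStep]; rw [if_pos h2]; rfl]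
      rw [ih,
        pvLastD_cons_pos p toks 2 a h2,
        pvLastD_cons_neg p toks 3 c (by simp [PySem.Str.len_eq];  omega),
        pvLastD_cons_neg p toks 4 b (by simp [PySem.Str.len_eq];  omega),
        pvLastD_cons_neg p toks 7 d (by simp [PySem.Str.len_eq];  omega),
        List.filter_cons, if_neg (by simp [PySem.Str.len_eq];  omega),
        List.filter_cons, if_neg (by simp [pvOther];  omega)]
      try simp
    · by_cases h3 : PySem.Str.len p = 3
      · have l3 : (p.length : Int) = 3 := by simpa using h3
        rw [show pvAStep (PySem.Dict.ofList [(1, a), (4, b), (7, c), (8, d)], PySem.Dict.ofList [(6, x), (5, y)]) p = (PySem.Dict.ofList [(1, a), (4, b), (7, p), (8, d)], PySem.Dict.ofList [(6, x), (5, y)]) from by simp only [pvAStep]; rw [if_neg h2]; rw [if_pos h3]; rfl]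
        rw [ih,
          pvLastD_cons_neg p toks 2 a (by simp [PySem.Str.len_eq];  omega),
          pvLastD_cons_pos p toks 3 c h3,
          pvLastD_cons_neg p toks 4 b (by simp [PySem.Str.len_eq];  omega),
          pvLastD_cons_neg p toks 7 d (by simp [PySem.Str.len_eq];  omega),
          List.filter_cons, if_neg (by simp [PySem.Str.len_eq];  omega),
          List.filter_cons, if_neg (by simp [pvOther];  omega)]
        try simp
      · by_cases h4 : PySem.Str.len p = 4
        · have l4 : (p.length : Int) = 4 := by simpa using h4
          rw [show pvAStep (PySem.Dict.ofList [(1, a), (4, b), (7, c), (8, d)], PySem.Dict.ofList [(6, x), (5, y)]) p = (PySem.Dict.ofList [(1, a), (4, p), (7, c), (8, d)], PySem.Dict.ofList [(6, x), (5, y)]) from by simp only [pvAStep]; rw [if_neg h2]; rw [if_neg h3]; rw [if_pos h4]; rfl]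
          rw [ih,
            pvLastD_cons_neg p toks 2 a (by simp [PySem.Str.len_eq];  omega),
            pvLastD_cons_neg p toks 3 c (by simp [PySem.Str.len_eq];  omega),
            pvLastD_cons_pos p toks 4 b h4,
            pvLastD_cons_neg p toks 7 d (by simp [PySem.Str.len_eq];  omega),
            List.filter_cons, if_neg (by simp [PySem.Str.len_eq];  omega),
            List.filter_cons, if_neg (by simp [pvOther];  omega)]
          try simp
        · by_cases h7 : PySem.Str.len p = 7
          · have l7 : (p.length : Int) = 7 := by simpa using h7
            rw [show pvAStep (PySem.Dict.ofList [(1, a), (4, b), (7, c), (8, d)], PySem.Dict.ofList [(6, x), (5, y)]) p = (PySem.Dict.ofList [(1, a), (4, b), (7, c), (8, p)], PySem.Dict.ofList [(6, x), (5, y)]) from by simp only [pvAStep]; rw [if_neg h2]; rw [if_neg h3]; rw [if_neg h4]; rw [if_pos h7]; rfl]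
            rw [ih,
              pvLastD_cons_neg p toks 2 a (by simp [PySem.Str.len_eq];  omega),
              pvLastD_cons_neg p toks 3 c (by simp [PySem.Str.len_eq];  omega),
              pvLastD_cons_neg p toks 4 b (by simp [PySem.Str.len_eq];  omega),
              pvLastD_cons_pos p toks 7 d h7,
              List.filter_cons, if_neg (by simp [PySem.Str.len_eq];  omega),
              List.filter_cons, if_neg (by simp [pvOther];  omega)]
            try simp
          · by_cases h6 : PySem.Str.len p = 6
            · have l6 : (p.length : Int) = 6 := by simpa using h6
              rw [show pvAStep (PySem.Dict.ofList [(1, a), (4, b), (7, c), (8, d)], PySem.Dict.ofList [(6, x), (5, y)]) p = (PySem.Dict.ofList [(1, a), (4, b), (7, c), (8, d)], PySem.Dict.ofList [(6, x ++ [p]), (5, y)]) from by simp only [pvAStep]; rw [if_neg h2]; rw [if_neg h3]; rw [if_neg h4]; rw [if_neg h7]; rw [if_pos h6]; rfl]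
              rw [ih,
                pvLastD_cons_neg p toks 2 a (by simp [PySem.Str.len_eq];  omega),
                pvLastD_cons_neg p toks 3 c (by simp [PySem.Str.len_eq];  omega),
                pvLastD_cons_neg p toks 4 b (by simp [PySem.Str.len_eq];  omega),
                pvLastD_cons_neg p toks 7 d (by simp [PySem.Str.len_eq];  omega),
                List.filter_cons, if_pos (by simpa using h6),
                List.filter_cons, if_neg (by simp [pvOther];  omega)]
              try simp
            · have n2 : ¬ (p.length : Int) = 2 := by simpa using h2
              have n3 : ¬ (p.length : Int) = 3 := by simpa using h3
              have n4 : ¬ (p.length : Int) = 4 := by simpa using h4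
              have n7 : ¬ (p.length : Int) = 7 := by simpa using h7
              have n6 : ¬ (p.length : Int) = 6 := by simpa using h6
              rw [show pvAStep (PySem.Dict.ofList [(1, a), (4, b), (7, c), (8, d)], PySem.Dict.ofList [(6, x), (5, y)]) p = (PySem.Dict.ofList [(1, a), (4, b), (7, c), (8, d)], PySem.Dict.ofList [(6, x), (5, y ++ [p])]) from by simp only [pvAStep]; rw [if_neg h2]; rw [if_neg h3]; rw [if_neg h4]; rw [if_neg h7]; rw [if_neg h6]; rfl]
              rw [ih,
                  pvLastD_cons_neg p toks 2 a (by simp [PySem.Str.len_eq];  omega),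
                  pvLastD_cons_neg p toks 3 c (by simp [PySem.Str.len_eq];  omega),
                  pvLastD_cons_neg p toks 4 b (by simp [PySem.Str.len_eq];  omega),
                  pvLastD_cons_neg p toks 7 d (by simp [PySem.Str.len_eq];  omega),
                  List.filter_cons, if_neg (by simp [PySem.Str.len_eq];  omega),
                  List.filter_cons, if_pos (by simp [pvOther];  omega)]
              try simp

lemma pvBuckets_getD_aux (toks : List String) (d : PySem.Dict Int (List String)) (n : Int) :
    (toks.foldl (fun d p => d.insert (PySem.Str.len p) (d.getD (PySem.Str.len p) [] ++ [p])) d).getD n []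
      = d.getD n [] ++ toks.filter (fun p => decide (PySem.Str.len p = n)) := by
  induction toks generalizing d with
  | nil => simp
  | cons p toks ih =>
    simp only [List.foldl_cons, ih, PySem.Dict.getD_insert, List.filter_cons]
    by_cases h : PySem.Str.len p = n
    · have h' : (p.length : Int) = n := by simpa using h
      simp [h']
    · have h' : ¬ (p.length : Int) = n := by simpa using h
      have h'' : ¬ n = (p.length : Int) := fun hh => h' hh.symm
      simp [h', h'']

lemma pvBuckets_getD (toks : List String) (n : Int) :
    (pvBuckets toks).getD n [] = toks.filter (fun p => decide (PySem.Str.len p = n)) := by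
  rw [pvBuckets, pvBuckets_getD_aux]
  rfl

lemma pvLast_eq (toks : List String) (n : Int) :
    pvLast (pvBuckets toks) n = pvLastD toks n "" := by
  rw [pvLast, pvBuckets_getD, pvLastD]
  cases (toks.filter (fun p => decide (PySem.Str.len p = n))).getLast? <;> rfl

lemma pvItems4 (v1 v2 v3 v4 : String) :
    (PySem.Dict.empty.update [(1, v1), (4, v2), (7, v3), (8, v4)] : PySem.Dict Int String).items
      = [(1, v1), (4, v2), (7, v3), (8, v4)] := rfl

lemma pvItems2 (w1 w2 : List String) :
    (PySem.Dict.empty.update [(6, w1), (5, w2)] : PySem.Dict Int (List String)).items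
      = [(6, w1), (5, w2)] := rfl

-- ===== VERDICT (by name: the statement is the Claim_ definition above) =====
theorem unique_shared_values_spec : Claim_equal_unique_shared_values := by
  intro s _
  show unique_shared_values s = unique_shared_values_alt s
  rw [unique_shared_values, unique_shared_values_alt]
  rw [show (fun p => !(decide (PySem.Str.len p ∈ ([2, 3, 4, 6, 7] : List Int)))) = pvOther from rfl]
  rw [pvAfold]
  rw [pvLast_eq, pvLast_eq, pvLast_eq, pvLast_eq, pvBuckets_getD]
  simp only [List.nil_append, Prod.mk.injEq, PySem.Dict.ofList]
  exact ⟨pvItems4 _ _ _ _, pvItems2 _ _⟩
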